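-- pv_equiv track=rewrite | github.com/Kkkassini/classifip | classifip/models/svmMultiLabel.py | create_q_couples_list
-- ===== SOURCE A (Python) =====
-- def create_q_couples_list(labels_list):
--     """
--     build list Q which contains the different arcs of labels
--     e.g. L1>L2>L3 ====> [[L1,L2],[L2,L3],[L1,L3]]
--     :param labels_list: list
--     :return: list of list
--     """
--     res = []
--     nb_labels = len(labels_list)
--     for step in range(1, nb_labels):
--         for start in range(0, nb_labels):
--             if start + step < nb_labels and start < nb_labels - 1:
--                 res.append([labels_list[start], labels_list[start + step]])
--
--     return res
-- ===== SOURCE B (Python) =====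
-- def create_q_couples_list(labels_list):
--     n = len(labels_list)
--     pairs = [(i, j) for i in range(n) for j in range(i + 1, n)]
--     pairs.sort(key=lambda p: p[1] - p[0])
--     return [[labels_list[i], labels_list[j]] for i, j in pairs]
-- ===== Notes on version B (the rewrite author's own statement) =====
-- stated objective: alternative
-- what changed: B enumerates all index pairs once in lexicographic order and reorders them with a single stable sort keyed by index distance, replacing A's explicit per-distance double loop with a bounds test.
import Mathlib
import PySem

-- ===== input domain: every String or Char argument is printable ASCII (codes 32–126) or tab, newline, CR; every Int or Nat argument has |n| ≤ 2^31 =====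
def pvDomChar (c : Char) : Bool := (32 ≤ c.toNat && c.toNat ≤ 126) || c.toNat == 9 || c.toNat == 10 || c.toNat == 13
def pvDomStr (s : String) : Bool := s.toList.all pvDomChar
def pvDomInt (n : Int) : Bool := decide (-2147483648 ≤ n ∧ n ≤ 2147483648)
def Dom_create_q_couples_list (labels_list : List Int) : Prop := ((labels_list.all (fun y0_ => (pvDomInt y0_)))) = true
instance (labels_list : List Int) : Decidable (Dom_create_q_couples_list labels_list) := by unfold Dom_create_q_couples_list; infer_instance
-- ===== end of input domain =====

-- B generates every index pair once in lexicographic order and reorders the whole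
-- list with one stable sort keyed by the index distance, instead of A's explicit
-- double loop over each distance (objective: alternative decomposition, same cost).

-- ===== PORT A =====
def create_q_couples_list (labels_list : List Int) : List (List Int) :=
  let nb : Int := labels_list.length
  (PySem.List.pyRange 1 nb).foldl (fun res step =>
    (PySem.List.pyRange 0 nb).foldl (fun res start =>
      if start + step < nb ∧ start < nb - 1 then
        res ++ [[PySem.List.pyGetD labels_list start 0,
                 PySem.List.pyGetD labels_list (start + step) 0]]
      else res) res) []

-- ===== PORT B =====
def create_q_couples_list_alt (labels_list : List Int) : List (List Int) :=
  let n : Int := labels_list.length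
  let pairs : List (Int × Int) :=
    (PySem.List.pyRange 0 n).flatMap (fun i =>
      (PySem.List.pyRange (i + 1) n).map (fun j => (i, j)))
  let sortedPairs := PySem.List.sorted pairs (fun p => p.2 - p.1)
  sortedPairs.map (fun p =>
    [PySem.List.pyGetD labels_list p.1 0, PySem.List.pyGetD labels_list p.2 0])

-- ===== PRECONDITION & SPEC =====
def Spec_create_q_couples_list (labels_list : List Int) (out : List (List Int)) : Prop := out = create_q_couples_list_alt labels_list
instance (labels_list : List Int) (out : List (List Int)) : Decidable (Spec_create_q_couples_list labels_list out) := by unfold Spec_create_q_couples_list; infer_instance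

-- ===== CLAIM (what is proved, stated in full; the proofs are below) =====
def Claim_equal_create_q_couples_list : Prop := ∀ (labels_list : List Int), Dom_create_q_couples_list labels_list → Spec_create_q_couples_list labels_list (create_q_couples_list labels_list)

-- ===== LEMMAS AND PROOFS =====

-- inserting an element that compares "not before" every element of ys lands past ys
theorem insertBy_append_not_before {α : Type} (before : α → α → Bool) (x : α)
    (ys zs : List α) (h : ∀ y ∈ ys, before x y = false) :
    PySem.List.insertBy before x (ys ++ zs) = ys ++ PySem.List.insertBy before x zs := by
  induction ys with
  | nil => simp
  | cons y ys ih =>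
      have hy : before x y = false := h y (by simp)
      simp [PySem.List.insertBy, hy, ih (fun a ha => h a (by simp [ha]))]

-- inserting an element that compares "before" every element of zs lands in front
theorem insertBy_all_before {α : Type} (before : α → α → Bool) (x : α)
    (zs : List α) (h : ∀ y ∈ zs, before x y = true) :
    PySem.List.insertBy before x zs = x :: zs := by
  cases zs with
  | nil => simp [PySem.List.insertBy]
  | cons z zs => simp [PySem.List.insertBy, h z (by simp)]

-- stable sort = concatenation of the key-groups, listed by increasing key
theorem sorted_grouped {α : Type} (key : α → Int) (ks : List Int)
    (hks : ks.Pairwise (· < ·)) :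
    ∀ xs : List α, (∀ a ∈ xs, key a ∈ ks) →
      PySem.List.sorted xs key =
        ks.flatMap (fun v => xs.filter (fun a => decide (key a = v))) := by
  intro xs
  induction xs using List.reverseRecOn with
  | nil =>
      intro _
      rw [PySem.List.sorted_eq_foldl_insertBy]
      simp
  | append_singleton xs x ih =>
      intro hcov
      have hx : key x ∈ ks := hcov x (by simp)
      obtain ⟨l₁, l₂, rfl⟩ := List.append_of_mem hx
      rw [PySem.List.sorted_eq_foldl_insertBy, List.foldl_append]
      simp only [List.foldl_cons, List.foldl_nil]
      rw [← PySem.List.sorted_eq_foldl_insertBy,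
        ih (fun a ha => hcov a (by simp [ha]))]
      rw [List.pairwise_append] at hks
      obtain ⟨h₁, h₂, h₁₂⟩ := hks
      rw [List.pairwise_cons] at h₂
      -- the grouped list splits as groups-below ++ group-of-(key x) ++ groups-above
      have hflat : ∀ (f : Int → List α), (l₁ ++ key x :: l₂).flatMap f =
          l₁.flatMap f ++ f (key x) ++ l₂.flatMap f := by
        intro f; simp
      rw [hflat, hflat]
      rw [List.append_assoc, insertBy_append_not_before _ _ _ _ (by
        intro y hy
        simp only [List.mem_flatMap, List.mem_filter] at hy
        obtain ⟨v, hv, _, hkey⟩ := hy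
        have : v < key x := h₁₂ v hv (key x) (by simp)
        simp only [decide_eq_true_eq] at hkey
        simp [hkey]; omega)]
      rw [insertBy_append_not_before _ _ _ _ (by
        intro y hy
        simp only [List.mem_filter, decide_eq_true_eq] at hy
        simp [hy.2])]
      rw [insertBy_all_before _ _ _ (by
        intro y hy
        simp only [List.mem_flatMap, List.mem_filter, decide_eq_true_eq] at hy
        obtain ⟨v, hv, _, hkey⟩ := hy
        have : key x < v := h₂.1 v hv
        simp [hkey]; omega)]
      have hg₁ : l₁.flatMap (fun v => (xs ++ [x]).filter (fun a => decide (key a = v))) =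
          l₁.flatMap (fun v => xs.filter (fun a => decide (key a = v))) := by
        apply List.flatMap_congr
        intro v hv
        have hne : key x ≠ v := by have := h₁₂ v hv (key x) (by simp); omega
        simp [List.filter_append, hne]
      have hg₂ : l₂.flatMap (fun v => (xs ++ [x]).filter (fun a => decide (key a = v))) =
          l₂.flatMap (fun v => xs.filter (fun a => decide (key a = v))) := by
        apply List.flatMap_congr
        intro v hv
        have hne : key x ≠ v := by have := h₂.1 v hv; omega
        simp [List.filter_append, hne]
      have hgx : (xs ++ [x]).filter (fun a => decide (key a = key x)) =
          xs.filter (fun a => decide (key a = key x)) ++ [x] := by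
        simp [List.filter_append]
      rw [hg₁, hg₂, hgx]
      simp

-- the common normal form: for each distance, the pairs at that distance in order
def pvGrouped (labels_list : List Int) : List (List Int) :=
  let n : Int := labels_list.length
  (PySem.List.pyRange 1 n).flatMap (fun step =>
    (PySem.List.pyRange 0 (n - step)).map (fun start =>
      [PySem.List.pyGetD labels_list start 0,
       PySem.List.pyGetD labels_list (start + step) 0]))

theorem a_eq_grouped (labels_list : List Int) :
    create_q_couples_list labels_list = pvGrouped labels_list := by
  unfold create_q_couples_list pvGrouped
  set n : Int := (labels_list.length : Int) with hn
  have h0n : (0:Int) ≤ n := by simp [hn]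
  -- rewrite the inner loop as filter+map, the outer loop as flatMap
  have hinner : ∀ (step : Int) (res : List (List Int)), step ∈ PySem.List.pyRange 1 n →
      (PySem.List.pyRange 0 n).foldl (fun res start =>
        if start + step < n ∧ start < n - 1 then
          res ++ [[PySem.List.pyGetD labels_list start 0,
                   PySem.List.pyGetD labels_list (start + step) 0]]
        else res) res =
      res ++ (PySem.List.pyRange 0 (n - step)).map (fun start =>
        [PySem.List.pyGetD labels_list start 0,
         PySem.List.pyGetD labels_list (start + step) 0]) := by
    intro step res hstep
    rw [PySem.List.mem_pyRange_one] at hstep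
    have hfun : (fun (res : List (List Int)) (start : Int) =>
        if start + step < n ∧ start < n - 1 then
          res ++ [[PySem.List.pyGetD labels_list start 0,
                   PySem.List.pyGetD labels_list (start + step) 0]]
        else res) =
        (fun res start =>
          if (fun s => decide (s + step < n ∧ s < n - 1)) start = true then
            res ++ [[PySem.List.pyGetD labels_list start 0,
                     PySem.List.pyGetD labels_list (start + step) 0]]
          else res) := by
      funext res start; simp
    rw [hfun, PySem.List.foldl_append_if]
    congr 1
    have hsplit : PySem.List.pyRange 0 n =
        PySem.List.pyRange 0 (n - step) ++ PySem.List.pyRange (n - step) n := by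
      exact PySem.List.pyRange_one_append 0 (n - step) n (by omega) (by omega)
    rw [hsplit, List.filter_append]
    have hfst : (PySem.List.pyRange 0 (n - step)).filter
        (fun s => decide (s + step < n ∧ s < n - 1)) =
        PySem.List.pyRange 0 (n - step) := by
      apply List.filter_eq_self.mpr
      intro s hs
      rw [PySem.List.mem_pyRange_one] at hs
      simp; omega
    have hsnd : (PySem.List.pyRange (n - step) n).filter
        (fun s => decide (s + step < n ∧ s < n - 1)) = [] := by
      apply List.filter_eq_nil_iff.mpr
      intro s hs
      rw [PySem.List.mem_pyRange_one] at hs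
      simp; omega
    rw [hfst, hsnd, List.append_nil]
  calc (PySem.List.pyRange 1 n).foldl (fun res step =>
        (PySem.List.pyRange 0 n).foldl (fun res start =>
          if start + step < n ∧ start < n - 1 then
            res ++ [[PySem.List.pyGetD labels_list start 0,
                     PySem.List.pyGetD labels_list (start + step) 0]]
          else res) res) []
      = (PySem.List.pyRange 1 n).foldl (fun res step =>
          res ++ (PySem.List.pyRange 0 (n - step)).map (fun start =>
            [PySem.List.pyGetD labels_list start 0,
             PySem.List.pyGetD labels_list (start + step) 0])) [] := by
        apply PySem.List.foldl_congr_mem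
        intro res step hstep
        exact hinner step res hstep
    _ = _ := by
        rw [PySem.List.foldl_append_eq_flatMap]
        simp

-- a distance-d pair survives the filter iff its start lies below n - d
theorem filter_pairs_eq (n d : Int) (hd : 1 ≤ d) (hdn : d < n) :
    ((PySem.List.pyRange 0 n).flatMap (fun i =>
        (PySem.List.pyRange (i + 1) n).map (fun j => (i, j)))).filter
      (fun p => decide (p.2 - p.1 = d)) =
    (PySem.List.pyRange 0 (n - d)).map (fun i => (i, i + d)) := by
  rw [List.filter_flatMap]
  have hsingle : ∀ i : Int, (((PySem.List.pyRange (i + 1) n).map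
      (fun j => (i, j))).filter fun p => decide (p.2 - p.1 = d)) =
      if i < n - d then [(i, i + d)] else [] := by
    intro i
    have hthis : (PySem.List.pyRange (i + 1) n).filter
        (fun j => decide (j - i = d)) =
        if i < n - d then [i + d] else [] := by
      by_cases hc : i < n - d
      · have hs : PySem.List.pyRange (i + 1) n =
            PySem.List.pyRange (i + 1) (i + d) ++ PySem.List.pyRange (i + d) (i + d + 1)
              ++ PySem.List.pyRange (i + d + 1) n := by
          rw [PySem.List.pyRange_one_append (i+1) (i+d) n (by omega) (by omega)]
          rw [PySem.List.pyRange_one_append (i+d) (i+d+1) n (by omega) (by omega)]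
          simp [List.append_assoc]
        rw [hs]
        simp only [List.filter_append]
        have h1 : (PySem.List.pyRange (i + 1) (i + d)).filter
            (fun j => decide (j - i = d)) = [] := by
          apply List.filter_eq_nil_iff.mpr
          intro j hj; rw [PySem.List.mem_pyRange_one] at hj; simp; omega
        have h2 : (PySem.List.pyRange (i + d + 1) n).filter
            (fun j => decide (j - i = d)) = [] := by
          apply List.filter_eq_nil_iff.mpr
          intro j hj; rw [PySem.List.mem_pyRange_one] at hj; simp; omega
        rw [h1, h2, PySem.List.pyRange_one_singleton]
        simp [hc]
      · have hnil : (PySem.List.pyRange (i + 1) n).filter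
            (fun j => decide (j - i = d)) = [] := by
          apply List.filter_eq_nil_iff.mpr
          intro j hj; rw [PySem.List.mem_pyRange_one] at hj; simp; omega
        rw [hnil]; simp [hc]
    rw [List.filter_map]
    rw [List.filter_congr (q := fun j => decide (j - i = d)) (by intro j _; simp)]
    rw [hthis]
    by_cases hc : i < n - d <;> simp [hc]
  calc (PySem.List.pyRange 0 n).flatMap (fun i =>
        ((PySem.List.pyRange (i + 1) n).map (fun j => (i, j))).filter
          (fun p => decide (p.2 - p.1 = d)))
      = (PySem.List.pyRange 0 n).flatMap (fun i =>
          if i < n - d then [(i, i + d)] else []) := by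
        exact List.flatMap_congr (fun i _ => hsingle i)
    _ = _ := by
        rw [PySem.List.pyRange_one_append 0 (n - d) n (by omega) (by omega),
          List.flatMap_append]
        have h1 : (PySem.List.pyRange 0 (n - d)).flatMap
            (fun i => if i < n - d then [(i, i + d)] else []) =
            (PySem.List.pyRange 0 (n - d)).map (fun i => (i, i + d)) := by
          rw [List.flatMap_congr (g := fun i => [(i, i + d)])
            (by intro i hi; rw [PySem.List.mem_pyRange_one] at hi; simp [hi.2])]
          exact List.map_eq_flatMap.symm
        have h2 : (PySem.List.pyRange (n - d) n).flatMap
            (fun i => if i < n - d then [(i, i + d)] else []) = [] := by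
          rw [List.flatMap_congr (g := fun _ => ([] : List (Int × Int)))
            (by intro i hi; rw [PySem.List.mem_pyRange_one] at hi; simp; omega)]
          simp
        rw [h1, h2, List.append_nil]

theorem b_eq_grouped (labels_list : List Int) :
    create_q_couples_list_alt labels_list = pvGrouped labels_list := by
  unfold create_q_couples_list_alt pvGrouped
  dsimp only
  set n : Int := (labels_list.length : Int) with hn
  have h0n : (0:Int) ≤ n := by simp [hn]
  set P : List (Int × Int) := (PySem.List.pyRange 0 n).flatMap (fun i =>
    (PySem.List.pyRange (i + 1) n).map (fun j => (i, j))) with hP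
  have hcov : ∀ p ∈ P, (fun q : Int × Int => q.2 - q.1) p ∈ PySem.List.pyRange 1 n := by
    intro p hp
    rw [hP] at hp
    simp only [List.mem_flatMap, List.mem_map] at hp
    obtain ⟨i, hi, j, hj, rfl⟩ := hp
    rw [PySem.List.mem_pyRange_one] at hi hj
    rw [PySem.List.mem_pyRange_one]
    simp; omega
  rw [sorted_grouped _ (PySem.List.pyRange 1 n)
    (PySem.List.pairwise_lt_pyRange_one 1 n) P hcov]
  rw [List.map_flatMap]
  apply List.flatMap_congr
  intro d hd
  rw [PySem.List.mem_pyRange_one] at hd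
  rw [hP, filter_pairs_eq n d hd.1 hd.2]
  simp

-- ===== VERDICT (by name: the statement is the Claim_ definition above) =====
theorem create_q_couples_list_spec : Claim_equal_create_q_couples_list := by
  intro labels_list _
  unfold Spec_create_q_couples_list
  rw [a_eq_grouped, b_eq_grouped]
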